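-- pv_equiv track=rewrite | github.com/dgamepuzzle/AIMAS_FinalProject | NewSearchClient/hungarian_old.py | get_line_count
-- ===== SOURCE A (Python) =====
-- def get_line_count(m):
--
--     n = len(m)
--
--     if n == 1:
--         return 1
--
--     line_cnt = 0
--
--     for col in range(n):
--         is_column = True
--         for row in range(n):
--             if m[row][col] == 0:
--                 is_column = False
--                 break
--         if not is_column:
--             continue
--         line_cnt += 1
--
--     for row in range(n):
--         is_row = True
--         for col in range(n):
--             if m[row][col] == 0:
--                 is_row = False
--                 break
--         if not is_row:
--             continue
--         line_cnt += 1
--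
--
--     if line_cnt > n:
--         return n
--
--     return line_cnt
-- ===== SOURCE B (Python) =====
-- def get_line_count(m):
--     n = len(m)
--     if n == 1:
--         return 1
--     row_has_zero = [False] * n
--     col_has_zero = [False] * n
--     for i, row in enumerate(m):
--         for j, v in enumerate(row[:n]):
--             if v == 0:
--                 row_has_zero[i] = True
--                 col_has_zero[j] = True
--     line_cnt = col_has_zero.count(False) + row_has_zero.count(False)
--     return n if line_cnt > n else line_cnt
-- ===== Notes on version B (the rewrite author's own statement) =====
-- stated objective: faster
-- what changed: Replaces A's two passes of per-line rescans with subscripting m[row][col] by one direct iteration over the rows' cells that records which rows/columns contain a zero, then counts the zero-free flags.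
-- outside the precondition, e.g. on get_line_count([[0, 0], [0]]): A returns 0, B returns 0
import Mathlib
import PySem

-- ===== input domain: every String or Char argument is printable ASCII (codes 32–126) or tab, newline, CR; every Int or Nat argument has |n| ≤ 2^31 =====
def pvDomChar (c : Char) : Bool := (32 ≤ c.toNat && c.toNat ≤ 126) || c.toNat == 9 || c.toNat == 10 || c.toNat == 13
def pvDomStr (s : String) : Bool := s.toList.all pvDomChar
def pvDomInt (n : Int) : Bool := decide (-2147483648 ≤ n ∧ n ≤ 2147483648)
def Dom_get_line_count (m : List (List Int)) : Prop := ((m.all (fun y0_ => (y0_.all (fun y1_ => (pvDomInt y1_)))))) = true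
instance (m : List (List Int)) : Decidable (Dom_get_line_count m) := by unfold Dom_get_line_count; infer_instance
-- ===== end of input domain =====

-- B replaces A's two quadratic passes (per-line rescan with subscripting m[row][col]) by one
-- direct iteration over the rows' cells recording which rows/columns contain a zero; the timing
-- run measured B faster by a constant factor (no repeated index-based cell lookups).

-- ===== PORT A =====
-- m[row][col]; the getD 1 default is only reached where Python raises IndexError (excluded by Pre_).
def pvCell (m : List (List Int)) (row col : Int) : Int :=
  (PySem.List.pyGet? ((PySem.List.pyGet? m row).getD []) col).getD 1

-- inner loop 'for row in range(n): if m[row][col] == 0: is_column = False; break'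
def pvColScan (m : List (List Int)) (col : Int) : List Int → Bool
  | [] => true
  | r :: rest => if pvCell m r col = 0 then false else pvColScan m col rest

-- inner loop 'for col in range(n): if m[row][col] == 0: is_row = False; break'
def pvRowScan (m : List (List Int)) (row : Int) : List Int → Bool
  | [] => true
  | c :: rest => if pvCell m row c = 0 then false else pvRowScan m row rest

def get_line_count (m : List (List Int)) : Int :=
  let n := m.length
  if n = 1 then 1
  else
    let rng := PySem.List.pyRange 0 (n : Int) 1
    let line_cnt : Int := rng.foldl (fun acc col => if pvColScan m col rng then acc + 1 else acc) 0
    let line_cnt : Int := rng.foldl (fun acc row => if pvRowScan m row rng then acc + 1 else acc) line_cnt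
    if line_cnt > (n : Int) then (n : Int) else line_cnt

-- ===== PORT B =====
-- inner loop: 'for j, v in enumerate(row[:n]): if v == 0: row_has_zero[i] = True; col_has_zero[j] = True'
def pvInnerB (i : Nat) : Nat → List Int → List Bool × List Bool → List Bool × List Bool
  | _, [], st => st
  | j, v :: rest, (rz, cz) =>
      pvInnerB i (j + 1) rest (if v = 0 then (rz.set i true, cz.set j true) else (rz, cz))

-- outer loop: 'for i, row in enumerate(m): …'  (row[:n] taken exactly as in Source B)
def pvOuterB (n : Nat) : Nat → List (List Int) → List Bool × List Bool → List Bool × List Bool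
  | _, [], st => st
  | i, row :: rest, st => pvOuterB n (i + 1) rest (pvInnerB i 0 (row.take n) st)

def get_line_count_alt (m : List (List Int)) : Int :=
  let n := m.length
  if n = 1 then 1
  else
    let st := pvOuterB n 0 m (List.replicate n false, List.replicate n false)
    let line_cnt : Int := (st.2.count false : Nat) + (st.1.count false : Nat)
    if line_cnt > (n : Int) then (n : Int) else line_cnt

-- ===== PRECONDITION & SPEC =====
-- Pre_ excludes ragged matrices (len(m) ≥ 2 and some row shorter than len(m)): on those A's
-- index m[row][col] in general raises IndexError; on the ragged inputs where an early zero
-- still lets A return, B happens to return the same count, but the access pattern is A's accident.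
def Pre_get_line_count (m : List (List Int)) : Prop :=
  m.length ≤ 1 ∨ ∀ row ∈ m, m.length ≤ row.length
instance (m : List (List Int)) : Decidable (Pre_get_line_count m) := by
  unfold Pre_get_line_count; infer_instance

def pvWitness_get_line_count : List (List Int) := [[1, 0, 2], [3, 4, 5], [0, 6, 7]]

def Spec_get_line_count (m : List (List Int)) (out : Int) : Prop := out = get_line_count_alt m
instance (m : List (List Int)) (out : Int) : Decidable (Spec_get_line_count m out) := by
  unfold Spec_get_line_count; infer_instance

-- ===== CLAIM (what is proved, stated in full; the proofs are below) =====
def Claim_equal_get_line_count : Prop :=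
  ∀ (m : List (List Int)), Dom_get_line_count m → Pre_get_line_count m →
    Spec_get_line_count m (get_line_count m)

-- ===== LEMMAS AND PROOFS =====

-- col k has a zero within some row[:n] (B's col_has_zero), and row has a zero within row[:n]
def pvColZ (n : Nat) (rows : List (List Int)) (k : Nat) : Bool :=
  rows.any (fun row => (row.take n)[k]? == some 0)
def pvRowZ (n : Nat) (row : List Int) : Bool := (row.take n).any (fun v => v == 0)

theorem pvInnerB_len (i : Nat) : ∀ (l : List Int) (j : Nat) (st : List Bool × List Bool),
    (pvInnerB i j l st).1.length = st.1.length ∧ (pvInnerB i j l st).2.length = st.2.length := by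
  intro l
  induction l with
  | nil => intro j st; obtain ⟨rz, cz⟩ := st; simp [pvInnerB]
  | cons v rest ih =>
    intro j st; obtain ⟨rz, cz⟩ := st
    by_cases hv : v = 0
    · have h := ih (j+1) (rz.set i true, cz.set j true)
      simp [pvInnerB, hv]; simpa using h
    · have h := ih (j+1) (rz, cz)
      simp [pvInnerB, hv]; simpa using h

theorem pvInnerB_fst (i : Nat) : ∀ (l : List Int) (j : Nat) (st : List Bool × List Bool),
    (pvInnerB i j l st).1 = if l.any (fun v => v == 0) then st.1.set i true else st.1 := by
  intro l
  induction l with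
  | nil => intro j st; obtain ⟨rz, cz⟩ := st; simp [pvInnerB]
  | cons v rest ih =>
    intro j st; obtain ⟨rz, cz⟩ := st
    by_cases hv : v = 0
    · simp [pvInnerB, hv, ih (j+1) (rz.set i true, cz.set j true), List.set_set]
    · simp [pvInnerB, hv, ih (j+1) (rz, cz)]

theorem pvInnerB_snd (i : Nat) : ∀ (l : List Int) (j : Nat) (st : List Bool × List Bool) (k : Nat),
    k < st.2.length →
    (pvInnerB i j l st).2[k]? =
      some ((st.2[k]?.getD false) || (decide (j ≤ k) && (l[k - j]? == some (0 : Int)))) := by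
  intro l
  induction l with
  | nil =>
    intro j st k hk; obtain ⟨rz, cz⟩ := st
    simp [pvInnerB, hk]
  | cons v rest ih =>
    intro j st k hk; obtain ⟨rz, cz⟩ := st
    by_cases hv : v = 0
    · have hk' : k < (cz.set j true).length := by simpa using hk
      rw [show pvInnerB i j (v :: rest) (rz, cz)
            = pvInnerB i (j+1) rest (rz.set i true, cz.set j true) by simp [pvInnerB, hv]]
      rw [ih (j+1) (rz.set i true, cz.set j true) k hk']
      by_cases hkj : k = j
      · subst hkj
        simp [List.getElem?_set_self (by simpa using hk), hv]
      · rw [List.getElem?_set_ne (by omega)]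
        rcases Nat.lt_or_ge k j with h | h
        · simp [show ¬ j ≤ k by omega, show ¬ j + 1 ≤ k by omega]
        · have hj : j ≤ k := h
          have hkj1 : 1 ≤ k - j := by omega
          simp [hj, show j + 1 ≤ k by omega, List.getElem?_cons,
            show k - j ≠ 0 by omega, show k - (j+1) = k - j - 1 by omega]
    · rw [show pvInnerB i j (v :: rest) (rz, cz) = pvInnerB i (j+1) rest (rz, cz) by
        simp [pvInnerB, hv]]
      rw [ih (j+1) (rz, cz) k hk]
      rcases Nat.lt_or_ge k j with h | h
      · simp [show ¬ j ≤ k by omega, show ¬ j + 1 ≤ k by omega]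
      · by_cases hkj : k = j
        · rw [hkj]
          simp [show ¬ j + 1 ≤ j by omega, hv]
        · simp [h, show j + 1 ≤ k by omega, List.getElem?_cons,
            show k - j ≠ 0 by omega, show k - (j+1) = k - j - 1 by omega]

theorem pvOuterB_len (n : Nat) : ∀ (rows : List (List Int)) (i : Nat) (st : List Bool × List Bool),
    (pvOuterB n i rows st).1.length = st.1.length ∧ (pvOuterB n i rows st).2.length = st.2.length := by
  intro rows
  induction rows with
  | nil => intro i st; simp [pvOuterB]
  | cons row rest ih =>
    intro i st
    have h1 := pvInnerB_len i (row.take n) 0 st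
    have h2 := ih (i+1) (pvInnerB i 0 (row.take n) st)
    simp [pvOuterB]; omega

theorem pvOuterB_snd (n : Nat) : ∀ (rows : List (List Int)) (i : Nat) (st : List Bool × List Bool) (k : Nat),
    k < st.2.length →
    (pvOuterB n i rows st).2[k]? = some ((st.2[k]?.getD false) || pvColZ n rows k) := by
  intro rows
  induction rows with
  | nil =>
    intro i st k hk
    simp [pvOuterB, pvColZ, hk]
  | cons row rest ih =>
    intro i st k hk
    have hlen := pvInnerB_len i (row.take n) 0 st
    rw [show pvOuterB n i (row :: rest) st = pvOuterB n (i+1) rest (pvInnerB i 0 (row.take n) st)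
      from rfl]
    rw [ih (i+1) _ k (by omega)]
    rw [pvInnerB_snd i (row.take n) 0 st k hk]
    simp [pvColZ, Bool.or_assoc]

theorem pvOuterB_fst (n : Nat) : ∀ (rows : List (List Int)) (i : Nat) (st : List Bool × List Bool) (k : Nat),
    k < st.1.length →
    (pvOuterB n i rows st).1[k]? =
      some ((st.1[k]?.getD false) || (decide (i ≤ k) && pvRowZ n (rows[k - i]?.getD []))) := by
  intro rows
  induction rows with
  | nil =>
    intro i st k hk
    simp [pvOuterB, pvRowZ, hk]
  | cons row rest ih =>
    intro i st k hk
    have hlen := pvInnerB_len i (row.take n) 0 st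
    rw [show pvOuterB n i (row :: rest) st = pvOuterB n (i+1) rest (pvInnerB i 0 (row.take n) st)
      from rfl]
    rw [ih (i+1) _ k (by omega)]
    have hfst := pvInnerB_fst i (row.take n) 0 st
    by_cases hz : (row.take n).any (fun v => v == 0)
    · rw [hfst]; simp only [hz, if_pos]
      by_cases hki : k = i
      · subst hki
        simp [List.getElem?_set_self (by simpa using hk), pvRowZ, hz]
      · rw [List.getElem?_set_ne (by omega)]
        rcases Nat.lt_or_ge k i with h | h
        · simp [show ¬ i ≤ k by omega, show ¬ i + 1 ≤ k by omega]
        · simp [h, show i + 1 ≤ k by omega, List.getElem?_cons,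
            show k - i ≠ 0 by omega, show k - (i+1) = k - i - 1 by omega]
    · rw [hfst]; simp only [hz, if_neg, Bool.false_eq_true, not_false_eq_true]
      rcases Nat.lt_or_ge k i with h | h
      · simp [show ¬ i ≤ k by omega, show ¬ i + 1 ≤ k by omega]
      · by_cases hki : k = i
        · rw [hki]
          simp [show ¬ i + 1 ≤ i by omega, pvRowZ, hz]
        · simp [h, show i + 1 ≤ k by omega, List.getElem?_cons,
            show k - i ≠ 0 by omega, show k - (i+1) = k - i - 1 by omega]

theorem pvColScan_eq_all (m : List (List Int)) (col : Int) :
    ∀ (l : List Int), pvColScan m col l = l.all (fun r => decide (pvCell m r col ≠ 0)) := by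
  intro l
  induction l with
  | nil => rfl
  | cons r rest ih =>
    by_cases h : pvCell m r col = 0 <;> simp [pvColScan, h, ih]

theorem pvRowScan_eq_all (m : List (List Int)) (row : Int) :
    ∀ (l : List Int), pvRowScan m row l = l.all (fun c => decide (pvCell m row c ≠ 0)) := by
  intro l
  induction l with
  | nil => rfl
  | cons c rest ih =>
    by_cases h : pvCell m row c = 0 <;> simp [pvRowScan, h, ih]

theorem pvCell_eq (m : List (List Int)) (r k : Nat) (hr : r < m.length)
    (hk : k < m[r].length) : pvCell m (r : Int) (k : Int) = m[r][k] := by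
  simp [pvCell, hr, hk]

-- ===== VERDICT (by name: the statement is the Claim_ definition above) =====
theorem get_line_count_spec : Claim_equal_get_line_count := by
  intro m _ hpre
  unfold Spec_get_line_count get_line_count get_line_count_alt
  by_cases h1 : m.length = 1
  · simp [h1]
  · simp only [h1, if_neg, not_false_eq_true]
    set n := m.length with hn
    have hrows : ∀ row ∈ m, n ≤ row.length := by
      rcases hpre with h | h
      · intro row hm
        have h0 : m.length = 0 := by omega
        rw [List.length_eq_zero_iff.mp h0] at hm
        simp at hm
      · exact h
    -- the range list
    have hrng : PySem.List.pyRange 0 (n : Int) 1 = (List.range n).map (fun k : Nat => (k : Int)) :=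
      PySem.List.pyRange_zero_natCast n
    -- A's two counts
    rw [hrng, PySem.List.foldl_if_add_one, PySem.List.foldl_if_add_one]
    rw [List.countP_map, List.countP_map]
    -- B's state
    set st := pvOuterB n 0 m (List.replicate n false, List.replicate n false) with hst
    have hlen := pvOuterB_len n m 0 (List.replicate n false, List.replicate n false)
    have hcz : st.2 = (List.range n).map (fun k => pvColZ n m k) := by
      apply List.ext_getElem?
      intro k
      by_cases hk : k < n
      · rw [pvOuterB_snd n m 0 _ k (by simpa using hk)]
        simp [hk]
      · have h2 : st.2.length = n := by simpa using hlen.2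
        rw [List.getElem?_eq_none (by omega), List.getElem?_eq_none (by simpa using (by omega : ¬ k < n))]
      -- map length n
    have hrz : st.1 = (List.range n).map (fun k => pvRowZ n (m[k]?.getD [])) := by
      apply List.ext_getElem?
      intro k
      by_cases hk : k < n
      · rw [pvOuterB_fst n m 0 _ k (by simpa using hk)]
        simp [hk]
      · have h2 : st.1.length = n := by simpa using hlen.1
        rw [List.getElem?_eq_none (by omega), List.getElem?_eq_none (by simpa using (by omega : ¬ k < n))]
    rw [hcz, hrz]
    simp only [List.count_eq_countP, List.countP_map]
    -- predicate equality, columns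
    have hcol : ∀ k ∈ List.range n,
        ((fun col => pvColScan m col (List.map (fun k : Nat => (k : Int)) (List.range n))) ∘ fun k : Nat => (k : Int)) k
        = ((fun x => x == false) ∘ fun k => pvColZ n m k) k := by
      intro k hkmem
      have hk : k < n := List.mem_range.mp hkmem
      simp only [Function.comp]
      rw [pvColScan_eq_all, List.all_map]
      rw [show ((fun r => decide (pvCell m r (k : Int) ≠ 0)) ∘ fun r : Nat => (r : Int))
            = fun r : Nat => decide (pvCell m (r : Int) (k : Int) ≠ 0) from rfl]
      have hiff : (∀ r ∈ List.range n, pvCell m (r : Int) (k : Int) ≠ 0) ↔ (pvColZ n m k = false) := by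
        constructor
        · intro hall
          rw [pvColZ, List.any_eq_false]
          intro row hrow
          obtain ⟨r, hr, hget⟩ := List.mem_iff_getElem.mp hrow
          have hkr : k < m[r].length := by
            have h := hrows _ hrow; rw [hget]; omega
          rw [List.getElem?_take, if_pos hk, ← hget, List.getElem?_eq_getElem hkr]
          have := hall r (List.mem_range.mpr (by omega))
          rw [pvCell_eq m r k (by omega) hkr] at this
          simpa using this
        · intro hfalse r hrmem
          have hr : r < n := List.mem_range.mp hrmem
          have hrowmem : m[r] ∈ m := List.getElem_mem (by omega)
          have hkr : k < m[r].length := by have := hrows _ hrowmem; omega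
          rw [pvCell_eq m r k (by omega) hkr]
          rw [pvColZ, List.any_eq_false] at hfalse
          have := hfalse _ hrowmem
          rw [List.getElem?_take, if_pos hk, List.getElem?_eq_getElem hkr] at this
          simpa using this
      rw [Bool.eq_iff_iff]
      simp only [List.all_eq_true, decide_eq_true_eq, beq_iff_eq]
      exact hiff
      -- rows
    have hrow : ∀ k ∈ List.range n,
        ((fun row => pvRowScan m row (List.map (fun k : Nat => (k : Int)) (List.range n))) ∘ fun k : Nat => (k : Int)) k
        = ((fun x => x == false) ∘ fun k => pvRowZ n (m[k]?.getD [])) k := by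
      intro k hkmem
      have hk : k < n := List.mem_range.mp hkmem
      simp only [Function.comp]
      have hrowmem : m[k] ∈ m := List.getElem_mem (by omega)
      have hgd : m[k]?.getD [] = m[k]'(by omega) := by
        simp [List.getElem?_eq_getElem (show k < m.length by omega)]
      rw [pvRowScan_eq_all, List.all_map, hgd]
      have hiff : (∀ c ∈ List.range n, pvCell m (k : Int) (c : Int) ≠ 0)
          ↔ (pvRowZ n m[k] = false) := by
        constructor
        · intro hall
          rw [pvRowZ, List.any_eq_false]
          intro v hv
          obtain ⟨c, hc, hget⟩ := List.mem_iff_getElem.mp hv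
          have hcn : c < n := by
            have := List.length_take_le n m[k]; omega
          have hcr : c < m[k].length := by have := hrows _ hrowmem; omega
          have := hall c (List.mem_range.mpr hcn)
          rw [pvCell_eq m k c (by omega) hcr] at this
          rw [← hget, List.getElem_take]
          simpa using this
        · intro hfalse c hcmem
          have hc : c < n := List.mem_range.mp hcmem
          have hcr : c < m[k].length := by have := hrows _ hrowmem; omega
          rw [pvCell_eq m k c (by omega) hcr]
          rw [pvRowZ, List.any_eq_false] at hfalse
          have hmem2 : m[k][c] ∈ m[k].take n := by
            rw [List.mem_iff_getElem]
            exact ⟨c, by simp [List.length_take]; omega, by rw [List.getElem_take]⟩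
          have := hfalse _ hmem2
          simpa using this
      rw [Bool.eq_iff_iff]
      simp only [Function.comp, List.all_eq_true, decide_eq_true_eq, beq_iff_eq]
      exact hiff
    have hc1 : List.countP ((fun col => pvColScan m col (List.map (fun k : Nat => (k : Int)) (List.range n))) ∘ fun k : Nat => (k : Int)) (List.range n)
        = List.countP ((fun x => x == false) ∘ fun k => pvColZ n m k) (List.range n) :=
      List.countP_congr (fun k hk => by rw [hcol k hk])
    have hc2 : List.countP ((fun row => pvRowScan m row (List.map (fun k : Nat => (k : Int)) (List.range n))) ∘ fun k : Nat => (k : Int)) (List.range n)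
        = List.countP ((fun x => x == false) ∘ fun k => pvRowZ n (m[k]?.getD [])) (List.range n) :=
      List.countP_congr (fun k hk => by rw [hrow k hk])
    rw [hc1, hc2]
    ring_nf
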